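-- pv_equiv track=rewrite | github.com/kevinsung/circuit-knitting-toolbox | circuit_knitting_toolbox/circuit_cutting/wire_cutting/wire_cutting_post_processing.py | get_init_meas
-- ===== SOURCE A (Python) =====
-- import itertools
-- from typing import Dict, Sequence, Union, Tuple, List, Optional, Any
--
-- def get_init_meas(
--     init_label: Sequence[str], meas_label: Sequence[str]
-- ) -> List[Tuple[Tuple[str, ...], Tuple[str, ...]]]:
--     init_combinations = []
--     for x in init_label:
--         if x == "zero":
--             init_combinations.append(["zero"])
--         elif x == "I":
--             init_combinations.append(["+zero", "+one"])
--         elif x == "X":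
--             init_combinations.append(["2plus", "-zero", "-one"])
--         elif x == "Y":
--             init_combinations.append(["2plusI", "-zero", "-one"])
--         elif x == "Z":
--             init_combinations.append(["+zero", "-one"])
--         else:
--             raise Exception("Illegal initilization symbol :", x)
--     init_combinations = list(itertools.product(*init_combinations))  # type: ignore
--
--     meas_combinations = []
--     for x in meas_label:
--         meas_combinations.append([x])
--     meas_combinations = list(itertools.product(*meas_combinations))  # type: ignore
--
--     subcircuit_init_meas = []
--     for init in init_combinations:
--         for meas in meas_combinations:
--             subcircuit_init_meas.append((tuple(init), tuple(meas)))
--     return subcircuit_init_meas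
-- ===== SOURCE B (Python) =====
-- _CHOICES = {
--     "zero": ["zero"],
--     "I": ["+zero", "+one"],
--     "X": ["2plus", "-zero", "-one"],
--     "Y": ["2plusI", "-zero", "-one"],
--     "Z": ["+zero", "-one"],
-- }
--
--
-- def get_init_meas(init_label, meas_label):
--     # Rank-decoding (mixed-radix "odometer") algorithm: instead of expanding the
--     # Cartesian product list-by-list, compute the total number of combinations and
--     # decode each rank k in [0, total) into its combination via divmod digits
--     # (rightmost symbol = least-significant digit, matching itertools.product order).
--     choices = []
--     for x in init_label:
--         if x not in _CHOICES:
--             raise Exception("Illegal initilization symbol :", x)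
--         choices.append(_CHOICES[x])
--     total = 1
--     for c in choices:
--         total *= len(c)
--     meas = tuple(meas_label)
--     out = []
--     for k in range(total):
--         r = k
--         sel = []
--         for c in reversed(choices):
--             r, d = divmod(r, len(c))
--             sel.append(c[d])
--         sel.reverse()
--         out.append((tuple(sel), meas))
--     return out
-- ===== Notes on version B (the rewrite author's own statement) =====
-- stated objective: alternative
-- what changed: Replaces A's list-by-list Cartesian-product expansion (if/elif chain + itertools.product + nested pairing loop) by rank decoding: count the total number of combinations and reconstruct each rank k in [0,total) independently via mixed-radix divmod digits, pairing it directly with tuple(meas_label).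
import Mathlib
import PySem

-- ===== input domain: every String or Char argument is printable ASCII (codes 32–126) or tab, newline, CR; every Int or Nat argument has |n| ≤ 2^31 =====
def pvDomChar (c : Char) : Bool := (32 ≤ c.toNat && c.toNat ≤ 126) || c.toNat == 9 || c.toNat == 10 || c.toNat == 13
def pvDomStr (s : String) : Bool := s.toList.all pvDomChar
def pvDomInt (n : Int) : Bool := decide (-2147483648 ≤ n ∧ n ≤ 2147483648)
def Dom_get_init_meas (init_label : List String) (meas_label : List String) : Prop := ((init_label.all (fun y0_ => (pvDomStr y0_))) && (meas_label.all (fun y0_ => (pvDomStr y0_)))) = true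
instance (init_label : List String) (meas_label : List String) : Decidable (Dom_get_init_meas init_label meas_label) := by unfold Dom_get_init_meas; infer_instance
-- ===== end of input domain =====

-- B replaces A's product-expansion (if/elif chain + itertools.product + nested pairing loop)
-- by rank decoding: it counts the combinations and decodes each rank k by mixed-radix divmod
-- into its combination (objective: alternative, same output order).


-- ===== PORT A =====
-- A's per-symbol if/elif chain; on an unknown symbol Python raises (excluded by Pre_),
-- the port returns [] there.
def choicesA (x : String) : List String :=
  if x == "zero" then ["zero"]
  else if x == "I" then ["+zero", "+one"]
  else if x == "X" then ["2plus", "-zero", "-one"]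
  else if x == "Y" then ["2plusI", "-zero", "-one"]
  else if x == "Z" then ["+zero", "-one"]
  else []

-- itertools.product(*lists) (library call in A), leftmost list outermost
def iterProduct : List (List String) → List (List String)
  | [] => [[]]
  | l :: ls => l.flatMap (fun x => (iterProduct ls).map (fun rest => x :: rest))

def get_init_meas (init_label : List String) (meas_label : List String) : List (List String × List String) :=
  let init_lists := init_label.foldl (fun acc x => acc ++ [choicesA x]) []
  let init_combinations := iterProduct init_lists
  let meas_lists := meas_label.foldl (fun acc x => acc ++ [[x]]) []
  let meas_combinations := iterProduct meas_lists
  init_combinations.foldl (fun acc init =>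
    meas_combinations.foldl (fun acc2 meas => acc2 ++ [(init, meas)]) acc) []

-- ===== PORT B =====
def choicesDict : PySem.Dict String (List String) :=
  PySem.Dict.ofList [("zero", ["zero"]), ("I", ["+zero", "+one"]),
    ("X", ["2plus", "-zero", "-one"]), ("Y", ["2plusI", "-zero", "-one"]),
    ("Z", ["+zero", "-one"])]

-- one step of B's inner divmod loop: r, d = divmod(r, len(c)); sel.append(c[d])
-- (r is a Python nonnegative int, so Nat division is exact here; c[d] is always
-- in range in Python since k < total, the port totalises it with getD "")
def decodeStep (p : Nat × List String) (c : List String) : Nat × List String :=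
  (p.1 / c.length, p.2 ++ [(PySem.List.pyGet? c (Int.ofNat (p.1 % c.length))).getD ""])

def get_init_meas_alt (init_label : List String) (meas_label : List String) : List (List String × List String) :=
  -- B raises on a symbol missing from the dict (excluded by Pre_); the port uses [] there
  let choices := init_label.foldl (fun acc x => acc ++ [(choicesDict.get? x).getD []]) []
  let total := choices.foldl (fun t c => t * c.length) 1
  (List.range total).foldl (fun out k =>
    out ++ [((choices.reverse.foldl decodeStep (k, [])).2.reverse, meas_label)]) []

-- ===== PRECONDITION & SPEC =====
-- Pre_ excludes exactly the inputs where A raises Exception: an init symbol outside the five legal ones.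
def Pre_get_init_meas (init_label : List String) (meas_label : List String) : Prop :=
  ∀ x ∈ init_label, x ∈ (["zero", "I", "X", "Y", "Z"] : List String)
instance (init_label : List String) (meas_label : List String) : Decidable (Pre_get_init_meas init_label meas_label) := by unfold Pre_get_init_meas; infer_instance
def pvWitness_get_init_meas : List String × List String := (["I", "X"], ["comp", "comp"])

def Spec_get_init_meas (init_label : List String) (meas_label : List String) (out : List (List String × List String)) : Prop := out = get_init_meas_alt init_label meas_label
instance (init_label : List String) (meas_label : List String) (out : List (List String × List String)) : Decidable (Spec_get_init_meas init_label meas_label out) := by unfold Spec_get_init_meas; infer_instance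

-- ===== CLAIM =====
def Claim_equal_get_init_meas : Prop := ∀ (init_label : List String) (meas_label : List String), Dom_get_init_meas init_label meas_label → Pre_get_init_meas init_label meas_label → Spec_get_init_meas init_label meas_label (get_init_meas init_label meas_label)

-- ===== LEMMAS AND PROOFS =====

-- product of the list lengths (proof-side)
def Pl : List (List String) → Nat
  | [] => 1
  | c :: cs => c.length * Pl cs

-- the two symbol tables agree (both fall back to [] on an unknown symbol)
theorem choices_eq (x : String) : (choicesDict.get? x).getD [] = choicesA x := by
  unfold choicesA
  split_ifs with h1 h2 h3 h4 h5 <;>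
    simp only [beq_iff_eq] at * <;>
    try (subst_vars; rfl)
  have e1 : ("zero" == x) = false := beq_eq_false_iff_ne.mpr (Ne.symm h1)
  have e2 : ("I" == x) = false := beq_eq_false_iff_ne.mpr (Ne.symm h2)
  have e3 : ("X" == x) = false := beq_eq_false_iff_ne.mpr (Ne.symm h3)
  have e4 : ("Y" == x) = false := beq_eq_false_iff_ne.mpr (Ne.symm h4)
  have e5 : ("Z" == x) = false := beq_eq_false_iff_ne.mpr (Ne.symm h5)
  simp [choicesDict, PySem.Dict.ofList, PySem.Dict.get?, PySem.Dict.empty,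
    PySem.Dict.update, PySem.Dict.insert, List.find?, e1, e2, e3, e4, e5]

theorem foldl_append_map {α β : Type} (f : α → β) (xs : List α) (acc : List β) :
    xs.foldl (fun a x => a ++ [f x]) acc = acc ++ xs.map f := by
  induction xs generalizing acc with
  | nil => simp
  | cons y ys ih => simp [ih]

theorem iterProduct_singletons (ml : List String) :
    iterProduct (ml.map (fun x => [x])) = [ml] := by
  induction ml with
  | nil => rfl
  | cons y ys ih => simp [iterProduct, ih]

theorem foldl_pair (m : List String) (xs : List (List String))
    (acc : List (List String × List String)) :
    xs.foldl (fun a init => a ++ [(init, m)]) acc = acc ++ xs.map (fun init => (init, m)) := by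
  induction xs generalizing acc with
  | nil => simp
  | cons y ys ih => simp [ih]

theorem foldl_mul (cs : List (List String)) (t : Nat) :
    cs.foldl (fun t c => t * c.length) t = t * Pl cs := by
  induction cs generalizing t with
  | nil => simp [Pl]
  | cons c cs ih => simp [Pl, ih, Nat.mul_assoc]

theorem iterProduct_length (cs : List (List String)) :
    (iterProduct cs).length = Pl cs := by
  induction cs with
  | nil => rfl
  | cons c cs ih =>
    simp [iterProduct, Pl, List.length_flatMap, ih, List.map_const', Nat.mul_comm]

-- the divmod fold splits a rank q * Pl cs + r into quotient q and the digits of r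
theorem fold_decomp (cs : List (List String)) (q r : Nat) (sel : List String)
    (hr : r < Pl cs) :
    cs.reverse.foldl decodeStep (q * Pl cs + r, sel)
      = (q, (cs.reverse.foldl decodeStep (r, sel)).2) := by
  induction cs generalizing q r sel with
  | nil =>
    have h0 : r = 0 := by simp [Pl] at hr; omega
    subst h0
    simp [Pl]
  | cons c cs ih =>
    have hr' : r < c.length * Pl cs := by simpa [Pl] using hr
    have hPl : 0 < Pl cs := by
      rcases Nat.eq_zero_or_pos (Pl cs) with h | h
      · rw [h, Nat.mul_zero] at hr'
        omega
      · exact h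
    have hr'' : r < Pl cs * c.length := by
      rw [Nat.mul_comm]
      exact hr'
    have hr1 : r / Pl cs < c.length := Nat.div_lt_of_lt_mul hr''
    have hlen : 0 < c.length := by
      rcases Nat.eq_zero_or_pos c.length with h | h
      · rw [h, Nat.zero_mul] at hr'
        omega
      · exact h
    have hr0 : r % Pl cs < Pl cs := Nat.mod_lt _ hPl
    have hsum : r / Pl cs * Pl cs + r % Pl cs = r := Nat.div_add_mod' r (Pl cs)
    have hrw : q * Pl (c :: cs) + r = (q * c.length + r / Pl cs) * Pl cs + r % Pl cs := by
      have hring : (q * c.length + r / Pl cs) * Pl cs + r % Pl cs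
          = q * (c.length * Pl cs) + (r / Pl cs * Pl cs + r % Pl cs) := by ring
      rw [Pl, hring, hsum]
    rw [List.reverse_cons, List.foldl_append, List.foldl_append, hrw, ih _ _ _ hr0]
    conv_rhs => rw [show r = r / Pl cs * Pl cs + r % Pl cs from hsum.symm, ih _ _ _ hr0]
    have hd1 : (q * c.length + r / Pl cs) / c.length = q := by
      rw [Nat.mul_comm, Nat.mul_add_div hlen, Nat.div_eq_of_lt hr1]
      omega
    have hm1 : (q * c.length + r / Pl cs) % c.length = r / Pl cs := by
      rw [Nat.mul_comm, Nat.mul_add_mod, Nat.mod_eq_of_lt hr1]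
    have hm2 : r / Pl cs % c.length = r / Pl cs := Nat.mod_eq_of_lt hr1
    have hd2 : r / Pl cs / c.length = 0 := Nat.div_eq_of_lt hr1
    simp [decodeStep, hd1, hm1, hm2, hd2]

theorem decode_cons (c : List String) (cs : List (List String)) (k : Nat)
    (hk : k < Pl (c :: cs)) :
    ((c :: cs).reverse.foldl decodeStep (k, [])).2.reverse
      = (c.getD (k / Pl cs) "") :: (cs.reverse.foldl decodeStep (k % Pl cs, [])).2.reverse := by
  have hk' : k < c.length * Pl cs := by simpa [Pl] using hk
  have hPl : 0 < Pl cs := by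
    rcases Nat.eq_zero_or_pos (Pl cs) with h | h
    · rw [h, Nat.mul_zero] at hk'
      omega
    · exact h
  have hk'' : k < Pl cs * c.length := by
    rw [Nat.mul_comm]
    exact hk'
  have hq : k / Pl cs < c.length := Nat.div_lt_of_lt_mul hk''
  have hsum : k / Pl cs * Pl cs + k % Pl cs = k := Nat.div_add_mod' k (Pl cs)
  rw [List.reverse_cons, List.foldl_append]
  conv_lhs => rw [show k = k / Pl cs * Pl cs + k % Pl cs from hsum.symm,
    fold_decomp _ _ _ _ (Nat.mod_lt _ hPl)]
  have hm : k / Pl cs % c.length = k / Pl cs := Nat.mod_eq_of_lt hq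
  simp [decodeStep, hm, List.getD_eq_getElem?_getD]
  rw [← Int.natCast_div, PySem.List.pyGet?_natCast]

theorem getD_range_map {α : Type} (xs : List α) (d : α) :
    (List.range xs.length).map (fun i => xs.getD i d) = xs := by
  induction xs with
  | nil => rfl
  | cons x xs ih =>
    rw [List.length_cons, List.range_succ_eq_map, List.map_cons, List.map_map]
    simp only [Function.comp_def, List.getD_cons_succ, List.getD_cons_zero]
    rw [ih]

theorem range_mul_map {α : Type} (a b : Nat) (f : Nat → α) :
    (List.range (a * b)).map f
      = (List.range a).flatMap (fun q => (List.range b).map (fun r => f (q * b + r))) := by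
  induction a with
  | zero => simp
  | succ a ih =>
    rw [Nat.succ_mul, List.range_add, List.map_append, ih, List.range_succ,
        List.flatMap_append]
    simp [Nat.mul_comm]

-- main lemma: decoding every rank in order yields exactly itertools.product's list
theorem decode_range (cs : List (List String)) :
    (List.range (Pl cs)).map (fun k => (cs.reverse.foldl decodeStep (k, [])).2.reverse)
      = iterProduct cs := by
  induction cs with
  | nil => rfl
  | cons c cs ih =>
    rcases Nat.eq_zero_or_pos (Pl cs) with h0 | hPl
    · have : iterProduct (c :: cs) = [] := by
        have := iterProduct_length (c :: cs)
        rw [Pl, h0, Nat.mul_zero] at this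
        exact List.eq_nil_of_length_eq_zero this
      rw [this, Pl, h0, Nat.mul_zero]
      rfl
    · rw [Pl, range_mul_map]
      have step : ∀ q ∈ List.range c.length, ∀ r ∈ List.range (Pl cs),
          ((c :: cs).reverse.foldl decodeStep (q * Pl cs + r, [])).2.reverse
            = (c.getD q "") :: (cs.reverse.foldl decodeStep (r, [])).2.reverse := by
        intro q hq r hr
        rw [List.mem_range] at hq hr
        have hk : q * Pl cs + r < Pl (c :: cs) := by
          rw [Pl]
          calc q * Pl cs + r < q * Pl cs + Pl cs := by omega
          _ = (q + 1) * Pl cs := by ring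
          _ ≤ c.length * Pl cs := Nat.mul_le_mul_right _ (by omega)
        rw [decode_cons _ _ _ hk]
        have hdiv : (q * Pl cs + r) / Pl cs = q := by
          rw [Nat.add_comm, Nat.mul_comm, Nat.add_mul_div_left _ _ hPl, Nat.div_eq_of_lt hr]
          omega
        have hmod : (q * Pl cs + r) % Pl cs = r := by
          rw [Nat.mul_comm, Nat.mul_add_mod, Nat.mod_eq_of_lt hr]
        rw [hdiv, hmod]
      rw [List.flatMap_congr (fun q hq => List.map_congr_left (fun r hr => step q hq r hr))]
      rw [iterProduct]
      conv_rhs => rw [← getD_range_map c ""]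
      rw [List.flatMap_map]
      congr 1
      funext q
      rw [← ih, List.map_map]
      rfl

-- ===== VERDICT =====
theorem get_init_meas_spec : Claim_equal_get_init_meas := by
  intro il ml _ _
  show get_init_meas il ml = get_init_meas_alt il ml
  unfold get_init_meas get_init_meas_alt
  simp only [choices_eq]
  rw [foldl_append_map, foldl_append_map, foldl_append_map, List.nil_append, List.nil_append,
      List.nil_append, iterProduct_singletons, foldl_mul, Nat.one_mul, ← decode_range]
  simp only [List.foldl_cons, List.foldl_nil]
  rw [foldl_pair, List.nil_append, List.map_map]
  rfl
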